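-- pv_equiv track=rewrite | github.com/MrGiovanni/R-Super | organ_masks/correct_bug_in_gallbladder_npz.py | find_channel_indices
-- ===== SOURCE A (Python) =====
-- from typing import List, Tuple, Optional, Dict
--
-- def normalize_name(s: str) -> str:
--     s = s.lower()
--     for ch in [" ", "_", "-"]:
--         s = s.replace(ch, "")
--     return s
--
-- def find_channel_indices(input_names: List[str]) -> Tuple[Optional[int], Optional[int]]:
--     norm = [normalize_name(x) for x in input_names]
--     bladder_idx = None
--     gall_idx = None
--     for i, n in enumerate(norm):
--         if n == "bladder":
--             bladder_idx = i
--         elif n == "gallbladder":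
--             gall_idx = i
--     return bladder_idx, gall_idx
-- ===== SOURCE B (Python) =====
-- from typing import List, Tuple, Optional
--
-- def normalize_name(s: str) -> str:
--     s = s.lower()
--     for ch in [" ", "_", "-"]:
--         s = s.replace(ch, "")
--     return s
--
-- def find_channel_indices(input_names: List[str]) -> Tuple[Optional[int], Optional[int]]:
--     bladder_idx = None
--     gall_idx = None
--     for i in range(len(input_names) - 1, -1, -1):
--         n = normalize_name(input_names[i])
--         if bladder_idx is None and n == "bladder":
--             bladder_idx = i
--         if gall_idx is None and n == "gallbladder":
--             gall_idx = i
--         if bladder_idx is not None and gall_idx is not None: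
--             break
--     return bladder_idx, gall_idx
-- ===== Notes on version B (the rewrite author's own statement) =====
-- stated objective: alternative
-- what changed: Replaces the forward pass that overwrites indices across the whole list by a reverse scan that takes the first (i.e. last) match of each name and breaks as soon as both are found.
import Mathlib
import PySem

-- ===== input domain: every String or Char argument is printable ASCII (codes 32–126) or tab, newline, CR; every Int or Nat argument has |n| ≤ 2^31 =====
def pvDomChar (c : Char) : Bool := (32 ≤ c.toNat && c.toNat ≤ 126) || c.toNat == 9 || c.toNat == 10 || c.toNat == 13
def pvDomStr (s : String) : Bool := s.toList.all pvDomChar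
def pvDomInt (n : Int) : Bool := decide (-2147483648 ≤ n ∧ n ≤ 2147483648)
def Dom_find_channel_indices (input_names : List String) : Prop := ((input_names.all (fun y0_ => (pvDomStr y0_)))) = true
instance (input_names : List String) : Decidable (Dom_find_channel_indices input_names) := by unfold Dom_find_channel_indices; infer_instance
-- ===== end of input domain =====

-- B replaces A's forward overwriting pass by a reverse scan with early exit; alternative decomposition, same result.

-- ===== PORT A =====
-- normalize_name: lower, then remove " ", "_", "-" (shared helper, identical in both sources)
def normalize_name (s : String) : String :=
  [" ", "_", "-"].foldl (fun t ch => PySem.Str.replace t ch "") (PySem.Str.lower s)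

def find_channel_indices (input_names : List String) : Option Int × Option Int :=
  let norm := input_names.map normalize_name
  (PySem.List.enumerate norm).foldl
    (fun (st : Option Int × Option Int) p =>
      if p.2 = "bladder" then (some p.1, st.2)
      else if p.2 = "gallbladder" then (st.1, some p.1)
      else st)
    (none, none)

-- ===== PORT B =====
-- reverse index loop: for i in range(len-1, -1, -1), with break once both indices are set
def fci_go : List String → Int → Option Int → Option Int → Option Int × Option Int
  | [], _, b, g => (b, g)
  | x :: rest, i, b, g =>
    let n := normalize_name x
    let b' := if b = none ∧ n = "bladder" then some i else b
    let g' := if g = none ∧ n = "gallbladder" then some i else g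
    if b'.isSome ∧ g'.isSome then (b', g') else fci_go rest (i - 1) b' g'

def find_channel_indices_alt (input_names : List String) : Option Int × Option Int :=
  fci_go input_names.reverse ((input_names.length : Int) - 1) none none

-- ===== PRECONDITION & SPEC =====
def Spec_find_channel_indices (input_names : List String) (out : Option Int × Option Int) : Prop := out = find_channel_indices_alt input_names
instance (input_names : List String) (out : Option Int × Option Int) : Decidable (Spec_find_channel_indices input_names out) := by unfold Spec_find_channel_indices; infer_instance

-- ===== CLAIM (what is proved, stated in full; the proofs are below) =====
def Claim_equal_find_channel_indices : Prop := ∀ (input_names : List String), Dom_find_channel_indices input_names → Spec_find_channel_indices input_names (find_channel_indices input_names)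

-- ===== LEMMAS AND PROOFS =====

-- proof-only decomposition of fci_go into two independent scans
def scanB : List String → Int → Option Int → Option Int
  | [], _, b => b
  | x :: rest, i, b =>
    scanB rest (i - 1) (if b = none ∧ normalize_name x = "bladder" then some i else b)

def scanG : List String → Int → Option Int → Option Int
  | [], _, g => g
  | x :: rest, i, g =>
    scanG rest (i - 1) (if g = none ∧ normalize_name x = "gallbladder" then some i else g)

theorem scanB_some (l : List String) : ∀ (i : Int) (v : Int), scanB l i (some v) = some v := by
  induction l with
  | nil => intro i v; rfl
  | cons x rest ih => intro i v; simp only [scanB, reduceCtorEq, false_and, if_false]; exact ih _ _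

theorem scanG_some (l : List String) : ∀ (i : Int) (v : Int), scanG l i (some v) = some v := by
  induction l with
  | nil => intro i v; rfl
  | cons x rest ih => intro i v; simp only [scanG, reduceCtorEq, false_and, if_false]; exact ih _ _

theorem fci_go_eq_scan (l : List String) : ∀ (i : Int) (b g : Option Int),
    fci_go l i b g = (scanB l i b, scanG l i g) := by
  induction l with
  | nil => intro i b g; rfl
  | cons x rest ih =>
    intro i b g
    simp only [fci_go, scanB, scanG]
    set b' := if b = none ∧ normalize_name x = "bladder" then some i else b with hb'
    set g' := if g = none ∧ normalize_name x = "gallbladder" then some i else g with hg'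
    split
    · next h =>
      obtain ⟨v, hv⟩ := Option.isSome_iff_exists.mp h.1
      obtain ⟨w, hw⟩ := Option.isSome_iff_exists.mp h.2
      rw [hv, hw, scanB_some, scanG_some]
    · exact ih _ _ _

theorem enumerate_append_singleton {α : Type} (l : List α) (a : α) : ∀ (s : Int),
    PySem.List.enumerate (l ++ [a]) s = PySem.List.enumerate l s ++ [(s + l.length, a)] := by
  induction l with
  | nil => intro s; simp [PySem.List.enumerate_cons, PySem.List.enumerate_nil]
  | cons x rest ih =>
    intro s
    simp only [List.cons_append, PySem.List.enumerate_cons, ih (s + 1), List.length_cons]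
    push_cast
    ring_nf

theorem fci_eq (xs : List String) : find_channel_indices xs = find_channel_indices_alt xs := by
  induction xs using List.reverseRecOn with
  | nil => rfl
  | append_singleton l x ih =>
    have hA : find_channel_indices (l ++ [x]) =
        (let st := find_channel_indices l
         if normalize_name x = "bladder" then (some (l.length : Int), st.2)
         else if normalize_name x = "gallbladder" then (st.1, some (l.length : Int))
         else st) := by
      simp only [find_channel_indices, List.map_append, List.map_cons, List.map_nil,
        enumerate_append_singleton, List.foldl_append, List.foldl_cons, List.foldl_nil,
        List.length_map, zero_add]
    have hB : find_channel_indices_alt (l ++ [x]) =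
        fci_go (x :: l.reverse) ((l.length : Int)) none none := by
      have h1 : (l ++ [x]).reverse = x :: l.reverse := by simp
      have h2 : (((l ++ [x]).length : Int)) - 1 = (l.length : Int) := by
        simp [List.length_append]
      rw [find_channel_indices_alt, h1, h2]
    have hB' : find_channel_indices l =
        (scanB l.reverse ((l.length : Int) - 1) none, scanG l.reverse ((l.length : Int) - 1) none) := by
      rw [ih]
      show fci_go l.reverse ((l.length : Int) - 1) none none = _
      exact fci_go_eq_scan _ _ _ _
    rw [hA, hB]
    simp only [fci_go]
    by_cases hb : normalize_name x = "bladder"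
    · simp [hb, hB', fci_go_eq_scan, scanB_some]
    · by_cases hg : normalize_name x = "gallbladder"
      · simp [hg, hB', fci_go_eq_scan, scanG_some]
      · simp [hb, hg, hB', fci_go_eq_scan]

-- ===== VERDICT (by name: the statement is the Claim_ definition above) =====
theorem find_channel_indices_spec : Claim_equal_find_channel_indices := by
  intro xs _
  exact fci_eq xs
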